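-- pv_equiv track=rewrite | github.com/putian74/DAG-align | DAG_tools.py | reduce_consecutive
-- ===== SOURCE A (Python) =====
-- def reduce_consecutive(lst: list[int], start_index=1):
--
--     if not lst:
--         return [], []
--     result = [lst[0]]
--     indices = [[start_index]]
--     for i, curr in enumerate(lst[1:], start=start_index):
--         if curr != result[-1]:
--             result.append(curr)
--             indices.append([i + 1])
--         else:
--             indices[-1].append(i + 1)
--     return result, indices
-- ===== SOURCE B (Python) =====
-- def reduce_consecutive(lst: list[int], start_index=1):
--     result, indices = [], []
--     n = len(lst)
--     k = 0
--     while k < n: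
--         j = k + 1
--         while j < n and lst[j] == lst[k]:
--             j += 1
--         result.append(lst[k])
--         indices.append(list(range(start_index + k, start_index + j)))
--         k = j
--     return result, indices
-- ===== Notes on version B (the rewrite author's own statement) =====
-- stated objective: alternative
-- what changed: Replaces A's seeded-first-element loop that compares each element to the last emitted value and appends indices one at a time into the last index group with an iterative run scan: each pass finds the end of the current run of equal values and emits the value together with a whole range() of its indices.
import Mathlib
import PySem

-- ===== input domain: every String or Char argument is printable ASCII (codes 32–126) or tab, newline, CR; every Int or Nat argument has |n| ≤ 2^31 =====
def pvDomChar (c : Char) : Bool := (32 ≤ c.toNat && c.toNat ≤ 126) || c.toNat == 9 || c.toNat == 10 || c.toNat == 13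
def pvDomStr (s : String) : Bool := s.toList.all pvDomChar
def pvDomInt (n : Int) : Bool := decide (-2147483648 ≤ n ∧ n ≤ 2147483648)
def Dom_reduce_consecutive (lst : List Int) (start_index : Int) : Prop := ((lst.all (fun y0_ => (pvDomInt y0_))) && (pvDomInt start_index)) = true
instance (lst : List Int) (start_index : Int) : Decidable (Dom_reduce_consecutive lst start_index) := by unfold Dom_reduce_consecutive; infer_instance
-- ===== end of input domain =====

-- B replaces A's seeded-first-element loop (compare to the last emitted value, append each index
-- to the last index group) by an iterative run scan: find the end of each run of equal values and emit the value plus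
-- a range of its indices; objective: alternative (same cost, different decomposition).

-- ===== PORT A =====
-- last element of the (always nonempty) result list
def pvLastD (xs : List Int) : Int := (xs.getLast?).getD 0
-- append x to the last sub-list in place (Python's indices append on the last group)
def pvAppendLast (xss : List (List Int)) (x : Int) : List (List Int) :=
  xss.dropLast ++ [((xss.getLast?).getD []) ++ [x]]

-- the 'for i, curr in enumerate(lst[1:], start=start_index)' loop, state (result, indices)
def goA : List Int → Int → List Int × List (List Int) → List Int × List (List Int)
  | [], _, st => st
  | curr :: rest, i, (result, indices) =>
    if curr ≠ pvLastD result then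
      goA rest (i + 1) (result ++ [curr], indices ++ [[i + 1]])
    else
      goA rest (i + 1) (result, pvAppendLast indices (i + 1))

def reduce_consecutive (lst : List Int) (start_index : Int) : List Int × List (List Int) :=
  match lst with
  | [] => ([], [])
  | x :: tail => goA tail start_index ([x], [[start_index]])

-- ===== PORT B =====
-- the inner 'while j < n and lst[j] == lst[k]' scan: split off the leading run equal to x
def pvSplitRun (x : Int) : List Int → List Int × List Int
  | [] => ([], [])
  | y :: l =>
    if y = x then
      let p := pvSplitRun x l
      (y :: p.1, p.2)
    else ([], y :: l)

-- needed for goB's termination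
theorem pvSplitRun_snd_length_le (x : Int) (l : List Int) :
    (pvSplitRun x l).2.length ≤ l.length := by
  induction l with
  | nil => simp [pvSplitRun]
  | cons y l ih =>
    simp only [pvSplitRun]
    split
    · exact ih.trans (Nat.le_succ _)
    · simp

-- the outer 'while k < n' loop, advancing over the remaining suffix with its start index
def goB : List Int → Int → List Int × List (List Int)
  | [], _ => ([], [])
  | x :: rest, idx =>
    let p := pvSplitRun x rest
    let q := goB p.2 (idx + 1 + (p.1.length : Int))
    (x :: q.1, PySem.List.pyRange idx (idx + 1 + (p.1.length : Int)) 1 :: q.2)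
termination_by l _ => l.length
decreasing_by
  exact Nat.lt_succ_of_le (pvSplitRun_snd_length_le x rest)

def reduce_consecutive_alt (lst : List Int) (start_index : Int) : List Int × List (List Int) :=
  goB lst start_index

-- ===== PRECONDITION & SPEC =====
def Spec_reduce_consecutive (lst : List Int) (start_index : Int) (out : List Int × List (List Int)) : Prop := out = reduce_consecutive_alt lst start_index
instance (lst : List Int) (start_index : Int) (out : List Int × List (List Int)) : Decidable (Spec_reduce_consecutive lst start_index out) := by unfold Spec_reduce_consecutive; infer_instance

-- ===== CLAIM (what is proved, stated in full; the proofs are below) =====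
def Claim_equal_reduce_consecutive : Prop := ∀ (lst : List Int) (start_index : Int), Dom_reduce_consecutive lst start_index → Spec_reduce_consecutive lst start_index (reduce_consecutive lst start_index)

-- ===== LEMMAS AND PROOFS =====

-- canonical forward grouping bridging the two programs: current value v, its open run of
-- indices, current counter i
def goC : Int → List Int → Int → List Int → List Int × List (List Int)
  | v, run, _, [] => ([v], [run])
  | v, run, i, c :: l =>
    if c = v then goC v (run ++ [i + 1]) (i + 1) l
    else
      let q := goC c [i + 1] (i + 1) l
      (v :: q.1, run :: q.2)

theorem pvLastD_concat (res : List Int) (v : Int) : pvLastD (res ++ [v]) = v := by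
  simp [pvLastD]

theorem pvAppendLast_concat (ind : List (List Int)) (run : List Int) (x : Int) :
    pvAppendLast (ind ++ [run]) x = ind ++ [run ++ [x]] := by
  simp [pvAppendLast]

theorem goA_eq_goC : ∀ (l : List Int) (i v : Int) (run : List Int)
    (res : List Int) (ind : List (List Int)),
    goA l i (res ++ [v], ind ++ [run]) =
      (res ++ (goC v run i l).1, ind ++ (goC v run i l).2) := by
  intro l
  induction l with
  | nil => intro i v run res ind; simp [goA, goC]
  | cons c l ih =>
    intro i v run res ind
    by_cases h : c = v
    · subst h
      simp only [goA, goC, pvLastD_concat, ne_eq, not_true_eq_false, if_false,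
        pvAppendLast_concat]
      exact ih (i + 1) c (run ++ [i + 1]) res ind
    · have key := ih (i + 1) c [i + 1] (res ++ [v]) (ind ++ [run])
      simp only [List.append_assoc, List.singleton_append] at key
      simp only [goA, goC, pvLastD_concat, ne_eq, h, not_false_eq_true, if_true, if_false,
        List.append_assoc, List.singleton_append]
      simpa [h] using key

theorem goC_eq_goB : ∀ (l : List Int) (v a i : Int), a ≤ i →
    goC v (PySem.List.pyRange a (i + 1) 1) i l =
      (v :: (goB (pvSplitRun v l).2 (i + 1 + ((pvSplitRun v l).1.length : Int))).1,
       PySem.List.pyRange a (i + 1 + ((pvSplitRun v l).1.length : Int)) 1 ::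
         (goB (pvSplitRun v l).2 (i + 1 + ((pvSplitRun v l).1.length : Int))).2) := by
  intro l
  induction l with
  | nil => intro v a i ha; simp [goC, pvSplitRun, goB]
  | cons c l ih =>
    intro v a i ha
    by_cases h : c = v
    · subst h
      have e : i + 1 + (((pvSplitRun c l).1.length : Int) + 1)
          = i + 1 + 1 + ((pvSplitRun c l).1.length : Int) := by ring
      simp only [goC, pvSplitRun, if_true, List.length_cons,
        Nat.cast_add, Nat.cast_one, e]
      rw [← PySem.List.pyRange_one_succ_right (show a ≤ i + 1 by omega)]
      exact ih c a (i + 1) (by omega)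
    · simp only [goC, if_neg h, pvSplitRun]
      rw [show ([i + 1] : List Int) = PySem.List.pyRange (i + 1) ((i + 1) + 1) 1 from
        (PySem.List.pyRange_one_singleton (i + 1)).symm]
      rw [ih c (i + 1) (i + 1) le_rfl]
      simp [goB]

-- ===== VERDICT (by name: the statement is the Claim_ definition above) =====
theorem reduce_consecutive_spec : Claim_equal_reduce_consecutive := by
  intro lst start_index _
  unfold Spec_reduce_consecutive
  cases lst with
  | nil => simp [reduce_consecutive, reduce_consecutive_alt, goB]
  | cons x tail =>
    simp only [reduce_consecutive, reduce_consecutive_alt]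
    have h1 := goA_eq_goC tail start_index x [start_index] [] []
    simp only [List.nil_append] at h1
    rw [h1]
    rw [show ([start_index] : List Int) = PySem.List.pyRange start_index (start_index + 1) 1 from
      (PySem.List.pyRange_one_singleton start_index).symm]
    rw [goC_eq_goB tail x start_index start_index le_rfl]
    simp [goB]
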